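-- pv_equiv track=rewrite | github.com/ramosjorge-cmyk/python-logic-programming-100-exercises | sinonimos.py | extrair_intencao
-- ===== SOURCE A (Python) =====
-- from typing import Dict, List, Set
--
-- def extrair_intencao(frase: str) -> Dict[str, str | None]:
--     """
--     Extrai a intenção da frase:
--     - ação (ex: 'remover', 'ordenar')
--     - objeto (ex: 'lista', 'string')
--     - objetivo (resto da frase)
--     """
--     frase = frase.lower()
--     tokens = frase.split()
--
--     acoes = [
--         "contar", "somar", "subtrair", "multiplicar", "dividir",
--         "separar", "juntar", "remover", "ordenar", "percorrer",
--         "converter", "verificar", "comparar", "abrir", "ler"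
--     ]
--
--     objetos = [
--         "lista", "string", "texto", "ficheiro", "número", "numeros",
--         "caracteres", "vetor"
--     ]
--
--     acao = next((t for t in tokens if t in acoes), None)
--     objeto = next((t for t in tokens if t in objetos), None)
--
--     objetivo = None
--     if acao and acao in tokens:
--         idx = tokens.index(acao)
--         objetivo = " ".join(tokens[idx + 1:])
--     elif objeto and objeto in tokens:
--         idx = tokens.index(objeto)
--         objetivo = " ".join(tokens[idx + 1:])
--
--     return {
--         "acao": acao,
--         "objeto": objeto,
--         "objetivo": objetivo.strip() if objetivo else None,
--     }
-- ===== SOURCE B (Python) =====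
-- def extrair_intencao(frase):
--     """Inverted index: map each token to its first position in one backwards
--     pass, then query the keyword vocabularies against that index and take the
--     keyword with the minimal position (argmin) -- no scan of the token stream
--     for keywords."""
--     tokens = frase.lower().split()
--
--     pos = {}
--     for i, t in reversed(list(enumerate(tokens))):
--         pos[t] = i  # earliest occurrence survives
--
--     acoes = [
--         "contar", "somar", "subtrair", "multiplicar", "dividir",
--         "separar", "juntar", "remover", "ordenar", "percorrer",
--         "converter", "verificar", "comparar", "abrir", "ler"
--     ]
--
--     objetos = [
--         "lista", "string", "texto", "ficheiro", "número", "numeros",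
--         "caracteres", "vetor"
--     ]
--
--     hits_a = [w for w in acoes if w in pos]
--     hits_o = [w for w in objetos if w in pos]
--     acao = min(hits_a, key=lambda w: pos[w]) if hits_a else None
--     objeto = min(hits_o, key=lambda w: pos[w]) if hits_o else None
--
--     first = acao if acao is not None else objeto
--     objetivo = None
--     if first is not None:
--         objetivo = " ".join(tokens[pos[first] + 1:]) or None
--     return {"acao": acao, "objeto": objeto, "objetivo": objetivo}
-- ===== Notes on version B (the rewrite author's own statement) =====
-- stated objective: alternative
-- what changed: Replaces A's keyword scans over the token stream (two next() searches plus tokens.index) by an inverted index: one backwards pass builds a token-to-first-position dict, then each keyword vocabulary is queried against that dict and the keyword with the minimal position is taken by argmin.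
import Mathlib
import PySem

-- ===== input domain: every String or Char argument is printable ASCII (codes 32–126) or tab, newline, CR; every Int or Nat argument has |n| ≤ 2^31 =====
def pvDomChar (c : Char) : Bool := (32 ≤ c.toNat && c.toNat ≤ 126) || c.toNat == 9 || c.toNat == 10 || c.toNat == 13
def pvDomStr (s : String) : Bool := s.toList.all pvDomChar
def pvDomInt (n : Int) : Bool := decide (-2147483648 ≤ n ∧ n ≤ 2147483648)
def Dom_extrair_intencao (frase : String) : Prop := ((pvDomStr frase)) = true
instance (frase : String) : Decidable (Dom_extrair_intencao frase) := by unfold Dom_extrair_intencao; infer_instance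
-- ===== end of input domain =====

-- B replaces A's keyword scans over the token stream by an inverted index: a token->first-position
-- dict built in one backwards pass, then the vocabularies are queried against it by argmin; return values proved equal.


-- ===== PORT A =====
def pvAcoes : List String :=
  ["contar", "somar", "subtrair", "multiplicar", "dividir",
   "separar", "juntar", "remover", "ordenar", "percorrer",
   "converter", "verificar", "comparar", "abrir", "ler"]

def pvObjetos : List String :=
  ["lista", "string", "texto", "ficheiro", "número", "numeros",
   "caracteres", "vetor"]

-- Python truthiness of 'acao and acao in tokens' (str is falsy iff empty)
def pvTruthy (o : Option String) (tokens : List String) : Bool :=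
  match o with
  | some a => (!(a == "")) && tokens.contains a
  | none => false

-- tokens.index(t), then " ".join(tokens[idx + 1:]); index? is some whenever the guard held
def pvJoinAfter (tokens : List String) (t : String) : Option String :=
  (PySem.List.index? tokens t).map
    (fun idx => PySem.Str.join " " (PySem.List.slice tokens (some ((idx : Int) + 1)) none))

def extrair_intencao (frase : String) : List (String × Option String) :=
  let fr := PySem.Str.lower frase
  let tokens := PySem.Str.split₀ fr
  let acao := tokens.find? (fun t => pvAcoes.contains t)
  let objeto := tokens.find? (fun t => pvObjetos.contains t)
  let objetivo : Option String :=
    if pvTruthy acao tokens then acao.bind (pvJoinAfter tokens)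
    else if pvTruthy objeto tokens then objeto.bind (pvJoinAfter tokens)
    else none
  [("acao", acao), ("objeto", objeto),
   ("objetivo",
     match objetivo with
     | some s => if s == "" then none else some (PySem.Str.strip s)
     | none => none)]

-- ===== PORT B =====
-- 'for i, t in reversed(list(enumerate(tokens))): pos[t] = i' — the earliest position survives
def pvPosIndex (tokens : List String) : PySem.Dict String Int :=
  (PySem.List.enumerate tokens).reverse.foldl (fun d p => d.insert p.2 p.1) PySem.Dict.empty

def extrair_intencao_alt (frase : String) : List (String × Option String) :=
  let tokens := PySem.Str.split₀ (PySem.Str.lower frase)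
  let pos := pvPosIndex tokens
  let hitsA := pvAcoes.filter (fun w => pos.contains w)
  let hitsO := pvObjetos.filter (fun w => pos.contains w)
  -- 'min(hits, key=lambda w: pos[w]) if hits else None'; min? is none exactly on []; pos[w] exists for every hit
  let acao := PySem.List.min? hitsA (fun w => pos.getD w 0)
  let objeto := PySem.List.min? hitsO (fun w => pos.getD w 0)
  let first := match acao with | some a => some a | none => objeto
  let objetivo : Option String :=
    match first with
    | some w =>
        let s := PySem.Str.join " " (PySem.List.slice tokens (some (pos.getD w 0 + 1)) none)
        if s == "" then none else some s
    | none => none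
  [("acao", acao), ("objeto", objeto), ("objetivo", objetivo)]

-- ===== PRECONDITION & SPEC =====
def Spec_extrair_intencao (frase : String) (out : List (String × Option String)) : Prop := out = extrair_intencao_alt frase
instance (frase : String) (out : List (String × Option String)) : Decidable (Spec_extrair_intencao frase out) := by unfold Spec_extrair_intencao; infer_instance

-- ===== CLAIM (what is proved, stated in full; the proofs are below) =====
def Claim_equal_extrair_intencao : Prop := ∀ (frase : String), Dom_extrair_intencao frase → Spec_extrair_intencao frase (extrair_intencao frase)

-- ===== LEMMAS AND PROOFS =====

-- last write wins in a foldl of inserts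
lemma pvFoldInsert_get? (M : List (Int × String)) : ∀ (d : PySem.Dict String Int) (k : String),
    (M.foldl (fun d p => d.insert p.2 p.1) d).get? k
      = (match M.reverse.find? (fun p => p.2 == k) with
         | some p => some p.1
         | none => d.get? k) := by
  induction M with
  | nil => intro d k; simp
  | cons p M ih =>
    intro d k
    simp only [List.foldl_cons, List.reverse_cons, List.find?_append]
    rw [ih]
    cases h : M.reverse.find? (fun p => p.2 == k) with
    | some q => simp
    | none =>
      by_cases hk : p.2 = k
      · subst hk; simp [List.find?, PySem.Dict.get?_insert_self]
      · have hb : (p.2 == k) = false := by simp [hk]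
        simp [List.find?, hb, PySem.Dict.get?_insert_of_ne _ _ (Ne.symm hk)]

-- first hit of w in enumerate(tokens, s) is (s + first index, w)
lemma pvEnumFind (tokens : List String) (w : String) : ∀ (s : Int),
    (PySem.List.enumerate tokens s).find? (fun p => p.2 == w)
      = (PySem.List.index? tokens w).map (fun j : Nat => ((s + j : Int), w)) := by
  induction tokens with
  | nil => intro s; simp [PySem.List.enumerate]
  | cons x xs ih =>
    intro s
    rw [PySem.List.enumerate_cons]
    by_cases hx : x = w
    · subst hx
      rw [PySem.List.index?_cons_self]
      simp [List.find?]
    · rw [PySem.List.index?_cons_of_ne xs hx]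
      rw [List.find?_cons_of_neg (by simp [hx])]
      rw [ih (s + 1), Option.map_map]
      cases h : PySem.List.index? xs w with
      | none => simp
      | some j => simp; ring

lemma pvPos_get? (tokens : List String) (w : String) :
    (pvPosIndex tokens).get? w = (PySem.List.index? tokens w).map (fun j : Nat => (j : Int)) := by
  unfold pvPosIndex
  rw [pvFoldInsert_get?, List.reverse_reverse, pvEnumFind tokens w 0]
  cases h : PySem.List.index? tokens w with
  | none => simp [PySem.Dict.get?_empty]
  | some j => simp

lemma pvPos_contains (tokens : List String) (w : String) :
    (pvPosIndex tokens).contains w = tokens.contains w := by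
  rw [PySem.Dict.contains_eq_isSome_get?, pvPos_get?]
  cases h : PySem.List.index? tokens w with
  | none =>
    have := (PySem.List.index?_eq_none_iff tokens w).mp h
    simp [this]
  | some j =>
    have : w ∈ tokens := (PySem.List.index?_isSome_iff tokens w).mp (by rw [h]; rfl)
    simp [this]

lemma pvPos_getD (tokens : List String) (w : String) (j : Nat)
    (hj : PySem.List.index? tokens w = some j) :
    (pvPosIndex tokens).getD w 0 = (j : Int) := by
  rw [PySem.Dict.getD_eq_get?_getD, pvPos_get?, hj]; rfl

-- the foldl inside PySem.List.min?
def pvMinStep {α : Type} (key : α → Int) (acc : Option α) (x : α) : Option α :=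
  match acc with
  | none => some x
  | some b => if key x < key b then some x else some b

lemma pvMin?_eq_foldl {α : Type} (xs : List α) (key : α → Int) :
    PySem.List.min? xs key = xs.foldl (pvMinStep key) none := rfl

lemma pvMinLoop_keep {α : Type} (key : α → Int) (m : α) : ∀ (xs : List α),
    (∀ y ∈ xs, ¬ key y < key m) →
    xs.foldl (pvMinStep key) (some m) = some m := by
  intro xs
  induction xs with
  | nil => intro _; rfl
  | cons x t ih =>
    intro h
    have hx : ¬ key x < key m := h x (by simp)
    simp only [List.foldl_cons, pvMinStep, if_neg hx]
    exact ih (fun y hy => h y (by simp [hy]))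

lemma pvMinLoop_strict {α : Type} (key : α → Int) (m : α) : ∀ (xs : List α) (acc : Option α),
    m ∈ xs → (∀ y ∈ xs, y ≠ m → key m < key y) →
    (acc = none ∨ ∃ b, acc = some b ∧ key m < key b) →
    xs.foldl (pvMinStep key) acc = some m := by
  intro xs
  induction xs with
  | nil => intro acc hm; simp at hm
  | cons x t ih =>
    intro acc hm hlt hacc
    by_cases hx : x = m
    · subst hx
      have hstep : pvMinStep key acc x = some x := by
        rcases hacc with rfl | ⟨b, rfl, hb⟩
        · rfl
        · simp [pvMinStep, hb]
      rw [List.foldl_cons, hstep]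
      apply pvMinLoop_keep
      intro y hy
      by_cases hym : y = x
      · subst hym; omega
      · have := hlt y (by simp [hy]) hym; omega
    · have hm' : m ∈ t := by
        rcases List.mem_cons.mp hm with h | h
        · exact absurd h.symm hx
        · exact h
      have hxlt : key m < key x := hlt x (by simp) hx
      rw [List.foldl_cons]
      apply ih _ hm' (fun y hy hne => hlt y (by simp [hy]) hne)
      rcases hacc with rfl | ⟨b, rfl, hb⟩
      · exact Or.inr ⟨x, rfl, hxlt⟩
      · simp only [pvMinStep]
        split
        · exact Or.inr ⟨x, rfl, hxlt⟩
        · exact Or.inr ⟨b, rfl, hb⟩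

-- the argmin over the vocabulary hits IS the first vocabulary token of the stream
lemma pvVocMin (voc tokens : List String) :
    PySem.List.min? (voc.filter (fun w => (pvPosIndex tokens).contains w))
        (fun w => (pvPosIndex tokens).getD w 0)
      = tokens.find? (fun t => voc.contains t) := by
  cases hf : tokens.find? (fun t => voc.contains t) with
  | none =>
    have hnone := List.find?_eq_none.mp hf
    have : voc.filter (fun w => (pvPosIndex tokens).contains w) = [] := by
      rw [List.filter_eq_nil_iff]
      intro w hw
      rw [pvPos_contains]
      intro hc
      have hwt : w ∈ tokens := by simpa using hc
      have hnw : ¬ (voc.contains w = true) := by simpa using hnone w hwt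
      exact hnw (by simpa using hw)
    rw [this]; rfl
  | some m =>
    obtain ⟨hpm, as, bs, htk, has⟩ := List.find?_eq_some_iff_append.mp hf
    have hvm : m ∈ voc := by simpa using hpm
    have hmnas : m ∉ as := by
      intro h
      have h1 : m ∉ voc := by simpa using has m h
      exact h1 hvm
    have hidx : PySem.List.index? tokens m = some as.length :=
      (PySem.List.index?_eq_some_iff tokens m as.length).mpr ⟨as, bs, htk, rfl, hmnas⟩
    have hkeym : (pvPosIndex tokens).getD m 0 = (as.length : Int) := pvPos_getD _ _ _ hidx
    rw [pvMin?_eq_foldl]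
    apply pvMinLoop_strict _ m _ none _ _ (Or.inl rfl)
    · rw [List.mem_filter]
      refine ⟨by simpa using hpm, ?_⟩
      rw [pvPos_contains]
      simp [htk]
    · intro y hy hne
      rw [List.mem_filter, pvPos_contains] at hy
      obtain ⟨hyv, hyt⟩ := hy
      obtain ⟨jy, hjy⟩ := Option.isSome_iff_exists.mp
        ((PySem.List.index?_isSome_iff tokens y).mpr (by simpa using hyt))
      obtain ⟨hlt, hget, _⟩ := PySem.List.getElem_of_index?_eq_some hjy
      rw [hkeym, pvPos_getD _ _ _ hjy]
      have : as.length < jy := by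
        rcases lt_trichotomy jy as.length with h | h | h
        · exfalso
          have : tokens[jy] = as[jy]'h := by
            subst htk; exact List.getElem_append_left h
          have hymem : y ∈ as := by rw [← hget, this]; exact List.getElem_mem h
          exact absurd (by simpa using hyv) (by simpa using has y hymem)
        · exfalso
          have : tokens[jy] = m := by
            subst htk h
            simp
          exact hne (by rw [← hget, this])
        · exact h
      exact_mod_cast this

lemma pvAcoesNe : ∀ a ∈ pvAcoes, (a == "") = false := by decide
lemma pvObjetosNe : ∀ a ∈ pvObjetos, (a == "") = false := by decide

-- tokens produced by str.split() are nonempty and whitespace-free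
lemma pvGoClean (s : List Char) : ∀ (cur : List Char) (acc : List (List Char)),
    (∀ c ∈ cur, PySem.Chars.isspace c = false) →
    (∀ t ∈ acc, t ≠ [] ∧ ∀ c ∈ t, PySem.Chars.isspace c = false) →
    ∀ t ∈ PySem.Chars.split₀.go s cur acc, t ≠ [] ∧ ∀ c ∈ t, PySem.Chars.isspace c = false := by
  induction s with
  | nil =>
    intro cur acc hcur hacc t ht
    rw [PySem.Chars.split₀.go] at ht
    by_cases hc : cur.isEmpty = true
    · simp [hc] at ht; exact hacc t (by simpa using ht)
    · simp [hc] at ht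
      rcases ht with ht | ht
      · exact hacc t ht
      · subst ht
        refine ⟨by simpa using hc, ?_⟩
        intro c hc'; exact hcur c (by simpa using hc')
  | cons c rest ih =>
    intro cur acc hcur hacc t ht
    rw [PySem.Chars.split₀.go] at ht
    by_cases hs : PySem.Chars.isspace c = true
    · by_cases hc : cur.isEmpty = true
      · simp [hs, hc] at ht
        exact ih [] acc (by simp) hacc t ht
      · simp [hs, hc] at ht
        refine ih [] (cur.reverse :: acc) (by simp) ?_ t ht
        intro u hu
        rw [List.mem_cons] at hu
        rcases hu with hu | hu
        · subst hu
          exact ⟨by simpa using hc, fun d hd => hcur d (by simpa using hd)⟩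
        · exact hacc u hu
    · simp [hs] at ht
      refine ih (c :: cur) acc ?_ hacc t ht
      intro d hd
      rw [List.mem_cons] at hd
      rcases hd with hd | hd
      · subst hd; simpa using hs
      · exact hcur d hd

lemma pvTokensClean (s : List Char) :
    ∀ t ∈ PySem.Chars.split₀ s, t ≠ [] ∧ ∀ c ∈ t, PySem.Chars.isspace c = false := by
  intro t ht
  exact pvGoClean s [] [] (by simp) (by simp) t ht

lemma pvDropWhileJoin (ts : List (List Char))
    (h : ∀ t ∈ ts, t ≠ [] ∧ ∀ c ∈ t, PySem.Chars.isspace c = false) :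
    List.dropWhile PySem.Chars.isspace (PySem.Chars.join [' '] ts)
      = PySem.Chars.join [' '] ts := by
  cases ts with
  | nil => simp [PySem.Chars.join_nil]
  | cons t ts =>
    obtain ⟨hne, hcl⟩ := h t (by simp)
    obtain ⟨c, t', rfl⟩ : ∃ c t', t = c :: t' := by
      cases t with
      | nil => exact absurd rfl hne
      | cons c t' => exact ⟨c, t', rfl⟩
    have hc : PySem.Chars.isspace c = false := hcl c (by simp)
    cases ts with
    | nil => rw [PySem.Chars.join_singleton]; simp [hc]
    | cons u us =>
      rw [PySem.Chars.join_cons_cons]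
      simp [hc]

lemma pvJoinAppendSingleton (sep : List Char) (ts : List (List Char)) (t : List Char)
    (h : ts ≠ []) :
    PySem.Chars.join sep (ts ++ [t]) = PySem.Chars.join sep ts ++ sep ++ t := by
  induction ts with
  | nil => exact absurd rfl h
  | cons x ts ih =>
    cases ts with
    | nil =>
      rw [List.cons_append, List.nil_append, PySem.Chars.join_cons_cons,
        PySem.Chars.join_singleton, PySem.Chars.join_singleton]
    | cons y ts' =>
      have ih' := ih (by simp)
      simp only [List.cons_append] at ih' ⊢
      calc PySem.Chars.join sep (x :: y :: (ts' ++ [t]))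
          = x ++ sep ++ PySem.Chars.join sep (y :: (ts' ++ [t])) :=
            PySem.Chars.join_cons_cons sep x y (ts' ++ [t])
        _ = x ++ sep ++ (PySem.Chars.join sep (y :: ts') ++ sep ++ t) := by rw [ih']
        _ = (x ++ sep ++ PySem.Chars.join sep (y :: ts')) ++ sep ++ t := by
            simp [List.append_assoc]
        _ = PySem.Chars.join sep (x :: y :: ts') ++ sep ++ t := by
            rw [PySem.Chars.join_cons_cons]

lemma pvRevJoin (ts : List (List Char)) :
    (PySem.Chars.join [' '] ts).reverse
      = PySem.Chars.join [' '] ((ts.map List.reverse).reverse) := by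
  induction ts with
  | nil => simp [PySem.Chars.join_nil]
  | cons t ts ih =>
    cases ts with
    | nil => simp [PySem.Chars.join_singleton]
    | cons y ts' =>
      rw [PySem.Chars.join_cons_cons]
      have hne : ((y :: ts').map List.reverse).reverse ≠ [] := by simp
      calc ((t ++ [' '] ++ PySem.Chars.join [' '] (y :: ts')).reverse)
          = (PySem.Chars.join [' '] (y :: ts')).reverse ++ [' '] ++ t.reverse := by
            simp
        _ = PySem.Chars.join [' '] (((y :: ts').map List.reverse).reverse) ++ [' '] ++ t.reverse := by
            rw [ih]
        _ = PySem.Chars.join [' '] ((((y :: ts').map List.reverse).reverse) ++ [t.reverse]) := by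
            rw [pvJoinAppendSingleton _ _ _ hne]
        _ = PySem.Chars.join [' '] (((t :: y :: ts').map List.reverse).reverse) := by
            simp

lemma pvStripJoin (ts : List (List Char))
    (h : ∀ t ∈ ts, t ≠ [] ∧ ∀ c ∈ t, PySem.Chars.isspace c = false) :
    PySem.Chars.strip (PySem.Chars.join [' '] ts) = PySem.Chars.join [' '] ts := by
  have hrev : ∀ t ∈ (ts.map List.reverse).reverse, t ≠ [] ∧ ∀ c ∈ t, PySem.Chars.isspace c = false := by
    intro t ht
    simp only [List.mem_reverse, List.mem_map] at ht
    obtain ⟨u, hu, rfl⟩ := ht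
    obtain ⟨h1, h2⟩ := h u hu
    exact ⟨by simpa using h1, fun c hc => h2 c (by simpa using hc)⟩
  unfold PySem.Chars.strip PySem.Chars.lstrip PySem.Chars.rstrip
  rw [pvDropWhileJoin ts h, pvRevJoin, pvDropWhileJoin _ hrev, ← pvRevJoin, List.reverse_reverse]

lemma pvStripStr (tokens : List String)
    (hclean : ∀ t ∈ tokens, t.toList ≠ [] ∧ ∀ c ∈ t.toList, PySem.Chars.isspace c = false)
    (a? b? : Option Int) :
    PySem.Str.strip (PySem.Str.join " " (PySem.List.slice tokens a? b?))
      = PySem.Str.join " " (PySem.List.slice tokens a? b?) := by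
  apply String.toList_inj.mp
  rw [PySem.Str.toList_strip, PySem.Str.toList_join]
  have hsep : (" " : String).toList = [' '] := rfl
  rw [hsep]
  apply pvStripJoin
  intro t ht
  simp only [List.mem_map] at ht
  obtain ⟨u, hu, rfl⟩ := ht
  exact hclean u (PySem.List.mem_of_mem_slice tokens a? b? hu)

-- A's 'strip of the join of a tail slice' is B's plain join of that slice
lemma pvTail_eq (tokens : List String)
    (hclean : ∀ t ∈ tokens, t.toList ≠ [] ∧ ∀ c ∈ t.toList, PySem.Chars.isspace c = false)
    (a : String) (j : ℕ) (hj : PySem.List.index? tokens a = some j) :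
    (match (some a).bind (pvJoinAfter tokens) with
     | some s => if s == "" then none else some (PySem.Str.strip s)
     | none => none)
    = (if PySem.Str.join " " (PySem.List.slice tokens (some ((j : Int) + 1)) none) == ""
       then none
       else some (PySem.Str.join " " (PySem.List.slice tokens (some ((j : Int) + 1)) none))) := by
  have hval : pvJoinAfter tokens a
      = some (PySem.Str.join " " (PySem.List.slice tokens (some ((j : Int) + 1)) none)) := by
    unfold pvJoinAfter
    rw [hj]
    rfl
  have hbind : (some a).bind (pvJoinAfter tokens) = pvJoinAfter tokens a := rfl
  rw [hbind, hval]
  by_cases hs : PySem.Str.join " " (PySem.List.slice tokens (some ((j : Int) + 1)) none) = ""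
  · simp [hs]
  · simp only [beq_iff_eq, hs, ite_false]
    rw [pvStripStr tokens hclean]

lemma pvMain (tokens : List String)
    (hclean : ∀ t ∈ tokens, t.toList ≠ [] ∧ ∀ c ∈ t.toList, PySem.Chars.isspace c = false) :
    (let acao := tokens.find? (fun t => pvAcoes.contains t)
     let objeto := tokens.find? (fun t => pvObjetos.contains t)
     let objetivo : Option String :=
       if pvTruthy acao tokens then acao.bind (pvJoinAfter tokens)
       else if pvTruthy objeto tokens then objeto.bind (pvJoinAfter tokens)
       else none
     [("acao", acao), ("objeto", objeto),
      ("objetivo",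
        match objetivo with
        | some s => if s == "" then none else some (PySem.Str.strip s)
        | none => none)])
    = (let pos := pvPosIndex tokens
       let hitsA := pvAcoes.filter (fun w => pos.contains w)
       let hitsO := pvObjetos.filter (fun w => pos.contains w)
       let acao := PySem.List.min? hitsA (fun w => pos.getD w 0)
       let objeto := PySem.List.min? hitsO (fun w => pos.getD w 0)
       let first := match acao with | some a => some a | none => objeto
       let objetivo : Option String :=
         match first with
         | some w =>
             let s := PySem.Str.join " " (PySem.List.slice tokens (some (pos.getD w 0 + 1)) none)
             if s == "" then none else some s
         | none => none
       [("acao", acao), ("objeto", objeto), ("objetivo", objetivo)]) := by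
  simp only []
  rw [pvVocMin pvAcoes tokens, pvVocMin pvObjetos tokens]
  cases hA : tokens.find? (fun t => pvAcoes.contains t) with
  | none =>
    have hfalse : ¬ pvTruthy (none : Option String) tokens = true := by simp [pvTruthy]
    cases hO : tokens.find? (fun t => pvObjetos.contains t) with
    | none => rfl
    | some b =>
      have hbmem : b ∈ pvObjetos := by
        have := List.find?_some hO; simpa using this
      have htr : pvTruthy (some b) tokens = true := by
        simp [pvTruthy, pvObjetosNe b hbmem, List.mem_of_find?_eq_some hO]
      obtain ⟨j, hj⟩ := Option.isSome_iff_exists.mp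
        ((PySem.List.index?_isSome_iff tokens b).mpr (List.mem_of_find?_eq_some hO))
      rw [if_neg hfalse, if_pos htr]
      have h2 : (match (some b).bind (pvJoinAfter tokens) with
           | some s => if s == "" then none else some (PySem.Str.strip s)
           | none => none)
          = (if PySem.Str.join " "
                (PySem.List.slice tokens (some ((pvPosIndex tokens).getD b 0 + 1)) none) == ""
             then none
             else some (PySem.Str.join " "
                (PySem.List.slice tokens (some ((pvPosIndex tokens).getD b 0 + 1)) none))) := by
        rw [pvPos_getD tokens b j hj]
        exact pvTail_eq tokens hclean b j hj
      exact congrArg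
        (fun z => [("acao", (none : Option String)), ("objeto", (some b : Option String)),
          ("objetivo", z)]) h2
  | some a =>
    have hamem : a ∈ pvAcoes := by
      have := List.find?_some hA; simpa using this
    have htr : pvTruthy (some a) tokens = true := by
      simp [pvTruthy, pvAcoesNe a hamem, List.mem_of_find?_eq_some hA]
    obtain ⟨j, hj⟩ := Option.isSome_iff_exists.mp
      ((PySem.List.index?_isSome_iff tokens a).mpr (List.mem_of_find?_eq_some hA))
    rw [if_pos htr]
    have h2 : (match (some a).bind (pvJoinAfter tokens) with
         | some s => if s == "" then none else some (PySem.Str.strip s)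
         | none => none)
        = (if PySem.Str.join " "
              (PySem.List.slice tokens (some ((pvPosIndex tokens).getD a 0 + 1)) none) == ""
           then none
           else some (PySem.Str.join " "
              (PySem.List.slice tokens (some ((pvPosIndex tokens).getD a 0 + 1)) none))) := by
      rw [pvPos_getD tokens a j hj]
      exact pvTail_eq tokens hclean a j hj
    exact congrArg
      (fun z => [("acao", (some a : Option String)),
        ("objeto", tokens.find? (fun t => pvObjetos.contains t)), ("objetivo", z)]) h2

-- ===== VERDICT (by name: the statement is the Claim_ definition above) =====
theorem extrair_intencao_spec : Claim_equal_extrair_intencao := by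
  intro frase _
  unfold Spec_extrair_intencao extrair_intencao extrair_intencao_alt
  have hclean : ∀ t ∈ PySem.Str.split₀ (PySem.Str.lower frase),
      t.toList ≠ [] ∧ ∀ c ∈ t.toList, PySem.Chars.isspace c = false := by
    intro t ht
    have hmem : t.toList ∈ PySem.Chars.split₀ (PySem.Str.lower frase).toList := by
      rw [← PySem.Str.split₀_map_toList]
      exact List.mem_map_of_mem ht
    exact pvTokensClean _ _ hmem
  exact pvMain (PySem.Str.split₀ (PySem.Str.lower frase)) hclean
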